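-- pv_equiv track=rewrite | github.com/Manuel-Archila/Lab2_Cifrado | utils.py | sixblockbinary2binary
-- ===== SOURCE A (Python) =====
-- def sixblockbinary2binary(six_block):
--     long_block = "".join(six_block)
--     binaries = []
--     for i in range(0, len(long_block), 8):
--         binaries.append(long_block[i:i+8])
--
--     for i in range(len(binaries)):
--         if len(binaries[i]) < 8:
--             binaries[i] = binaries[i] + '0' * (8 - len(binaries[i]))
--     return binaries
-- ===== SOURCE B (Python) =====
-- def sixblockbinary2binary(six_block):
--     out = []
--     buf = ""
--     for s in six_block:
--         for ch in s:
--             buf += ch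
--             if len(buf) == 8:
--                 out.append(buf)
--                 buf = ""
--     if buf:
--         out.append(buf + "0" * (8 - len(buf)))
--     return out
-- ===== Notes on version B (the rewrite author's own statement) =====
-- stated objective: alternative
-- what changed: Streaming accumulator: iterate over the input strings character by character, flushing an 8-char buffer as soon as it fills and zero-padding the final partial buffer, instead of A's join-then-index-slice pass plus a second fix-up loop.
import Mathlib
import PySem

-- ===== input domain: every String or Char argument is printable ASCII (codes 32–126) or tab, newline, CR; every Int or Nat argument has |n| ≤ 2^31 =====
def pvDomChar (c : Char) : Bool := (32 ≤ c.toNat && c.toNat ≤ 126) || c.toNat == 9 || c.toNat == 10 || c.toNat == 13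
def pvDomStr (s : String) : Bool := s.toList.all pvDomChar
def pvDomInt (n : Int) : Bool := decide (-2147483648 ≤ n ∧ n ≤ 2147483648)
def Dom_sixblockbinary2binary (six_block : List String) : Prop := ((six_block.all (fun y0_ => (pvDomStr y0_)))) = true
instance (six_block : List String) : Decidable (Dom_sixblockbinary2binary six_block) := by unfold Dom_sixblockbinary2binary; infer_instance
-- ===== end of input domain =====

-- B is a single streaming pass with an 8-char buffer flushed when full (final partial buffer zero-padded),
-- instead of A's join + index/slice chunk loop followed by a second fix-up loop.

-- ===== PORT A =====
-- "".join → PySem.Chars.join with empty separator (exact); the final strings are rebuilt with String.ofList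
def sixblockbinary2binary (six_block : List String) : List String :=
  let long_block : List Char := PySem.Chars.join [] (six_block.map String.toList)
  let binaries : List (List Char) :=
    (PySem.List.pyRange 0 (long_block.length : Int) 8).foldl
      (fun acc i => acc ++ [PySem.List.slice long_block (some i) (some (i + 8))]) []
  -- second loop: in-place elementwise update binaries[i] = binaries[i] + '0'*(8-len)
  (binaries.map (fun b =>
      if b.length < 8 then b ++ List.replicate (8 - b.length) '0' else b)).map String.ofList

-- ===== PORT B =====
-- one character step of the streaming loop: extend the buffer, flush it into out when it reaches 8
def pvStep (st : List (List Char) × List Char) (c : Char) : List (List Char) × List Char :=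
  let buf' := st.2 ++ [c]
  if buf'.length == 8 then (st.1 ++ [buf'], []) else (st.1, buf')

def sixblockbinary2binary_alt (six_block : List String) : List String :=
  let st := six_block.foldl (fun st s => s.toList.foldl pvStep st) ([], [])
  let out := if st.2 ≠ [] then st.1 ++ [st.2 ++ List.replicate (8 - st.2.length) '0'] else st.1
  out.map String.ofList

-- ===== PRECONDITION & SPEC =====
def Spec_sixblockbinary2binary (six_block : List String) (out : List String) : Prop := out = sixblockbinary2binary_alt six_block
instance (six_block : List String) (out : List String) : Decidable (Spec_sixblockbinary2binary six_block out) := by unfold Spec_sixblockbinary2binary; infer_instance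

-- ===== CLAIM (what is proved, stated in full; the proofs are below) =====
def Claim_equal_sixblockbinary2binary : Prop := ∀ (six_block : List String), Dom_sixblockbinary2binary six_block → Spec_sixblockbinary2binary six_block (sixblockbinary2binary six_block)

-- ===== LEMMAS AND PROOFS =====

theorem pv_foldl_append_map {α β : Type} (f : α → β) (xs : List α) (acc : List β) :
    xs.foldl (fun a i => a ++ [f i]) acc = acc ++ xs.map f := by
  induction xs generalizing acc with
  | nil => simp
  | cons x xs ih => simp [List.foldl, ih]

-- the common chunk shape: consecutive 8-element pieces
def pvChunk (l : List Char) : List (List Char) :=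
  if _h : l = [] then [] else l.take 8 :: pvChunk (l.drop 8)
termination_by l.length
decreasing_by
  cases l with
  | nil => exact absurd rfl _h
  | cons a t => simp

theorem pvChunk_nil : pvChunk [] = [] := by simp [pvChunk]

theorem pvChunk_cons {l : List Char} (hl : l ≠ []) :
    pvChunk l = l.take 8 :: pvChunk (l.drop 8) := by
  rw [pvChunk, dif_neg hl]

theorem pv_pyRange8_cons (b : Int) (hb : 0 < b) :
    PySem.List.pyRange 0 b 8 = 0 :: (PySem.List.pyRange 0 (b - 8) 8).map (fun i => 8 + i) := by
  rw [PySem.List.pyRange_of_pos 0 b (by norm_num), PySem.List.pyRange_of_pos 0 (b-8) (by norm_num)]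
  by_cases h8 : 8 < b
  · have hc : ((b - 0 + 8 - 1) / 8).toNat = ((b - 8 - 0 + 8 - 1) / 8).toNat + 1 := by omega
    rw [if_pos hb, if_pos (show (0:Int) < b - 8 by omega), hc, List.range_succ_eq_map]
    simp only [List.map_cons, List.map_map, List.cons.injEq]
    refine ⟨by norm_num, List.map_congr_left ?_⟩
    intro k _
    simp only [Function.comp_apply]
    push_cast; ring
  · have hc : ((b - 0 + 8 - 1) / 8).toNat = 1 := by omega
    rw [if_pos hb, if_neg (show ¬ (0:Int) < b - 8 by omega), hc]
    simp [List.range_succ]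

theorem pv_pyRange8_nil (b : Int) (hb : b ≤ 0) : PySem.List.pyRange 0 b 8 = [] := by
  rw [PySem.List.pyRange_of_pos 0 b (by norm_num), if_neg (by omega)]
  simp

theorem pv_map_slice_eq_pvChunk (l : List Char) :
    (PySem.List.pyRange 0 (l.length : Int) 8).map
      (fun i => PySem.List.slice l (some i) (some (i + 8))) = pvChunk l := by
  induction l using pvChunk.induct with
  | case1 => rw [pvChunk_nil]; simp [PySem.List.pyRange]
  | case2 l hl ih =>
      have hpos : (0:Int) < (l.length : Int) := by
        cases l with
        | nil => exact absurd rfl hl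
        | cons a t => simp
      rw [pv_pyRange8_cons _ hpos, pvChunk_cons hl]
      simp only [List.map_cons, List.map_map, List.cons.injEq]
      constructor
      · rw [PySem.List.slice_zero_start, PySem.List.slice_to _ (by norm_num : (0:Int) ≤ 0 + 8)]
        norm_num
        rfl
      · rw [← ih]
        have hslice : ∀ i ∈ PySem.List.pyRange 0 ((l.length : Int) - 8) 8,
            PySem.List.slice l (some (8 + i)) (some (8 + i + 8)) =
            PySem.List.slice (l.drop 8) (some i) (some (i + 8)) := by
          intro i hi
          have h0 : 0 ≤ i := ((PySem.List.mem_pyRange_iff_of_pos (by norm_num) i).mp hi).1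
          rw [PySem.List.slice_toNat _ (by omega) (by omega),
              PySem.List.slice_toNat _ (by omega) (by omega), List.drop_drop]
          congr 1
          · omega
          · congr 1; omega
        have hrange : PySem.List.pyRange 0 ((l.length : Int) - 8) 8 =
            PySem.List.pyRange 0 (((l.drop 8).length : Int)) 8 := by
          by_cases h8 : 8 ≤ l.length
          · congr 1; simp; omega
          · rw [pv_pyRange8_nil _ (by omega),
                pv_pyRange8_nil _ (by simp; omega)]
        calc (PySem.List.pyRange 0 ((l.length : Int) - 8) 8).map
              (fun i => PySem.List.slice l (some (8 + i)) (some (8 + i + 8)))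
            = (PySem.List.pyRange 0 ((l.length : Int) - 8) 8).map
              (fun i => PySem.List.slice (l.drop 8) (some i) (some (i + 8))) :=
              List.map_congr_left hslice
          _ = _ := by rw [hrange]

-- the full 8-chunks of a char list, and the short remainder, as recursive functions
def pvFull (l : List Char) : List (List Char) :=
  if l.length < 8 then [] else l.take 8 :: pvFull (l.drop 8)
termination_by l.length
decreasing_by simp; omega

def pvRem (l : List Char) : List Char :=
  if l.length < 8 then l else pvRem (l.drop 8)
termination_by l.length
decreasing_by simp; omega

-- streaming invariant: folding pvStep over cs from (out, buf) appends the full chunks of buf++cs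
theorem pv_stream (cs : List Char) (out : List (List Char)) (buf : List Char)
    (h : buf.length < 8) :
    cs.foldl pvStep (out, buf) = (out ++ pvFull (buf ++ cs), pvRem (buf ++ cs)) := by
  induction cs generalizing out buf with
  | nil =>
      rw [List.foldl_nil, List.append_nil, pvFull, if_pos h, pvRem, if_pos h, List.append_nil]
  | cons c cs ih =>
      rw [List.foldl_cons]
      by_cases h8 : (buf ++ [c]).length = 8
      · have hstep : pvStep (out, buf) c = (out ++ [buf ++ [c]], []) := by
          simp only [pvStep]
          rw [if_pos (by simp only [h8]; rfl)]
        rw [hstep, ih _ [] (by norm_num)]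
        have hL : buf ++ c :: cs = (buf ++ [c]) ++ cs := by simp
        have hfull : pvFull (buf ++ c :: cs) = (buf ++ [c]) :: pvFull cs := by
          rw [hL, pvFull, if_neg (by rw [List.length_append, h8]; omega)]
          congr 1
          · rw [← h8]; exact List.take_left
          · rw [← h8]; exact congrArg pvFull List.drop_left
        have hrem : pvRem (buf ++ c :: cs) = pvRem cs := by
          rw [hL, pvRem, if_neg (by rw [List.length_append, h8]; omega)]
          rw [← h8, List.drop_left]
        rw [hfull, hrem]
        simp
      · have hlt : (buf ++ [c]).length < 8 := by
          rw [List.length_append] at h8 ⊢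
          simp at h8 ⊢
          omega
        have hstep : pvStep (out, buf) c = (out, buf ++ [c]) := by
          simp only [pvStep]
          rw [if_neg (by simpa using h8)]
        rw [hstep, ih _ _ hlt]
        simp

-- padding each chunk = full chunks plus the padded remainder
theorem pv_chunk_split (l : List Char) :
    (pvChunk l).map (fun b => if b.length < 8 then b ++ List.replicate (8 - b.length) '0' else b)
      = pvFull l ++ (if pvRem l ≠ [] then [pvRem l ++ List.replicate (8 - (pvRem l).length) '0'] else []) := by
  induction l using pvChunk.induct with
  | case1 => simp [pvChunk_nil, pvFull, pvRem]
  | case2 l hl ih =>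
      by_cases h8 : l.length < 8
      · have hdrop : l.drop 8 = [] := by rw [List.drop_eq_nil_iff]; omega
        rw [pvChunk_cons hl, hdrop, pvChunk_nil, pvFull, if_pos h8, pvRem, if_pos h8]
        have htake : l.take 8 = l := List.take_of_length_le (by omega)
        simp [htake, h8, hl]
      · rw [pvChunk_cons hl, pvFull, if_neg h8, pvRem, if_neg h8]
        simp only [List.map_cons]
        rw [if_neg (by rw [List.length_take]; omega), ih]
        simp

-- the empty-separator join is concatenation
theorem pv_join_nil_eq_flatten (xss : List (List Char)) :
    PySem.Chars.join [] xss = xss.flatten := by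
  induction xss with
  | nil => rfl
  | cons x xss ih =>
      cases xss with
      | nil => simp [PySem.Chars.join, List.intercalate]
      | cons y yss =>
          rw [PySem.Chars.join_cons_cons, ih]
          simp

-- the nested per-string fold is the fold over the concatenated characters
theorem pv_nested_foldl (six_block : List String) (st : List (List Char) × List Char) :
    six_block.foldl (fun st s => s.toList.foldl pvStep st) st
      = ((six_block.map String.toList).flatten).foldl pvStep st := by
  induction six_block generalizing st with
  | nil => simp
  | cons s rest ih => simp [List.foldl_cons, List.foldl_append, ih]

-- ===== VERDICT (by name: the statement is the Claim_ definition above) =====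
theorem sixblockbinary2binary_spec : Claim_equal_sixblockbinary2binary := by
  unfold Claim_equal_sixblockbinary2binary
  intro six_block _
  unfold Spec_sixblockbinary2binary sixblockbinary2binary sixblockbinary2binary_alt
  simp only
  rw [pv_foldl_append_map]
  simp only [List.nil_append]
  rw [pv_map_slice_eq_pvChunk, pv_nested_foldl, ← pv_join_nil_eq_flatten,
      pv_stream _ _ _ (by norm_num)]
  simp only [List.nil_append]
  congr 1
  rw [pv_chunk_split]
  by_cases hr : pvRem (PySem.Chars.join [] (six_block.map String.toList)) = [] <;> simp [hr]
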